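-- pv_equiv track=rewrite | github.com/filipedwan/CodeBench-Features-Extractor | Legacy extractor/tabelas_por_questao/por_questão_keystroke_latency.py | session
-- ===== SOURCE A (Python) =====
-- def session(codemirror,lista,turma):
-- 	aux1=[]
-- 	for l in lista:
-- 		contador=0
-- 		aux=len(l)-5
-- 		while(contador<len(codemirror)):
-- 			if(l[:aux]==codemirror[contador][:aux]):
-- 				aux1=aux1+[codemirror[contador]]
-- 			contador+=1
-- 	return aux1
-- ===== SOURCE B (Python) =====
-- def session(codemirror, lista, turma):
--     # Group codemirror entries by their prefix once per distinct prefix length,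
--     # then answer each lista element by a single dict lookup.
--     result = []
--     tables = {}
--     for l in lista:
--         aux = len(l) - 5
--         if aux not in tables:
--             t = {}
--             for c in codemirror:
--                 t.setdefault(c[:aux], []).append(c)
--             tables[aux] = t
--         result += tables[aux].get(l[:aux], [])
--     return result
-- ===== Notes on version B (the rewrite author's own statement) =====
-- stated objective: faster
-- what changed: Instead of scanning all of codemirror for every lista element, B builds, once per distinct prefix length, a dict grouping codemirror entries by their prefix and answers each lista element with one lookup.
import Mathlib
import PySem

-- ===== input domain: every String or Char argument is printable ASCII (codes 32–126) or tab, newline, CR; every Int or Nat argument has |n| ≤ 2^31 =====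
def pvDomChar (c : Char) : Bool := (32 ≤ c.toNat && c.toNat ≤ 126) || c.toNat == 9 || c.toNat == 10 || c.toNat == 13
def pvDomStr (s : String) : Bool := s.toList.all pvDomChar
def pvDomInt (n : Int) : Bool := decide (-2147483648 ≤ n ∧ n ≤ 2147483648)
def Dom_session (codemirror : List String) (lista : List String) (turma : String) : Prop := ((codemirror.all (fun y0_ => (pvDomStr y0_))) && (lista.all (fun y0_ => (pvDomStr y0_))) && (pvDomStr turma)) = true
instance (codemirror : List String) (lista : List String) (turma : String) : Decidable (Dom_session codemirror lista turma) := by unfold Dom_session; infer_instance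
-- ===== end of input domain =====

-- B groups the codemirror entries by prefix once per distinct prefix length and answers
-- each lista element with a single dict lookup (objective: faster; same return value).

-- ===== PORT A =====
-- the while loop over 'contador' visits codemirror[0..len-1] in order: a foldl over codemirror
def session (codemirror : List String) (lista : List String) (turma : String) : List String :=
  lista.foldl (fun aux1 l =>
    let aux : Int := (PySem.Str.len l : Int) - 5
    codemirror.foldl (fun acc c =>
      if PySem.Str.slice l none (some aux) = PySem.Str.slice c none (some aux)
      then acc ++ [c] else acc) aux1) []

-- ===== PORT B =====
-- t.setdefault(c[:aux], []).append(c)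
def sessionTable (codemirror : List String) (aux : Int) : PySem.Dict String (List String) :=
  codemirror.foldl (fun t c =>
    let k := PySem.Str.slice c none (some aux)
    t.insert k (t.getD k [] ++ [c])) PySem.Dict.empty

def session_alt (codemirror : List String) (lista : List String) (turma : String) : List String :=
  (lista.foldl (fun (st : List String × PySem.Dict Int (PySem.Dict String (List String))) l =>
    let aux : Int := (PySem.Str.len l : Int) - 5
    let tables := if st.2.contains aux then st.2 else st.2.insert aux (sessionTable codemirror aux)
    (st.1 ++ (tables.getD aux PySem.Dict.empty).getD (PySem.Str.slice l none (some aux)) [], tables))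
    ([], PySem.Dict.empty)).1

-- ===== PRECONDITION & SPEC =====
def Spec_session (codemirror : List String) (lista : List String) (turma : String) (out : List String) : Prop := out = session_alt codemirror lista turma
instance (codemirror : List String) (lista : List String) (turma : String) (out : List String) : Decidable (Spec_session codemirror lista turma out) := by unfold Spec_session; infer_instance

-- ===== CLAIM (what is proved, stated in full; the proofs are below) =====
def Claim_equal_session : Prop := ∀ (codemirror : List String) (lista : List String) (turma : String), Dom_session codemirror lista turma → Spec_session codemirror lista turma (session codemirror lista turma)

-- ===== LEMMAS AND PROOFS =====

-- the grouping table looked up at k gives exactly the entries whose prefix is k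
theorem sessionTable_getD (codemirror : List String) (aux : Int) (k : String) :
    ∀ (t : PySem.Dict String (List String)),
      (codemirror.foldl (fun t c =>
        let kk := PySem.Str.slice c none (some aux)
        t.insert kk (t.getD kk [] ++ [c])) t).getD k []
      = t.getD k [] ++ codemirror.filter (fun c => PySem.Str.slice c none (some aux) == k) := by
  induction codemirror with
  | nil => intro t; simp
  | cons c cs ih =>
    intro t
    simp only [List.foldl_cons, List.filter_cons]
    rw [ih]
    by_cases h : PySem.Str.slice c none (some aux) = k
    · subst h; rw [PySem.Dict.getD_insert_self]; simp
    · rw [PySem.Dict.getD_insert]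
      have h2 : (PySem.Str.slice c none (some aux) == k) = false := by
        simpa using h
      simp [Ne.symm h, h2]

theorem sessionTable_getD' (codemirror : List String) (aux : Int) (k : String) :
    (sessionTable codemirror aux).getD k []
      = codemirror.filter (fun c => PySem.Str.slice c none (some aux) == k) := by
  unfold sessionTable
  rw [sessionTable_getD]
  simp

-- A's inner while loop collects the same filter
theorem session_inner (codemirror : List String) (l : String) (aux : Int) (acc : List String) :
    codemirror.foldl (fun acc c =>
      if PySem.Str.slice l none (some aux) = PySem.Str.slice c none (some aux)
      then acc ++ [c] else acc) acc
    = acc ++ codemirror.filter (fun c => PySem.Str.slice c none (some aux) == PySem.Str.slice l none (some aux)) := by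
  induction codemirror generalizing acc with
  | nil => simp
  | cons c cs ih =>
    simp only [List.foldl_cons, List.filter_cons]
    rw [ih]
    by_cases h : PySem.Str.slice l none (some aux) = PySem.Str.slice c none (some aux)
    · simp [h]
    · have h2 : (PySem.Str.slice c none (some aux) == PySem.Str.slice l none (some aux)) = false := by
        simpa using fun hh => h hh.symm
      simp [h, h2]

-- B's loop with its memo table computes the same concatenation of filters, under the
-- invariant that every cached table is the table for its length
theorem session_alt_loop (codemirror : List String) :
    ∀ (lista : List String) (res : List String)
      (tables : PySem.Dict Int (PySem.Dict String (List String))),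
      (∀ a t, tables.get? a = some t → t = sessionTable codemirror a) →
      (lista.foldl (fun (st : List String × PySem.Dict Int (PySem.Dict String (List String))) l =>
        let aux : Int := (PySem.Str.len l : Int) - 5
        let tables := if st.2.contains aux then st.2 else st.2.insert aux (sessionTable codemirror aux)
        (st.1 ++ (tables.getD aux PySem.Dict.empty).getD (PySem.Str.slice l none (some aux)) [], tables))
        (res, tables)).1
      = lista.foldl (fun res l =>
          let aux : Int := (PySem.Str.len l : Int) - 5
          res ++ codemirror.filter (fun c =>
            PySem.Str.slice c none (some aux) == PySem.Str.slice l none (some aux))) res := by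
  intro lista
  induction lista with
  | nil => intro res tables _; rfl
  | cons l ls ih =>
    intro res tables hinv
    simp only [List.foldl_cons]
    set aux : Int := (PySem.Str.len l : Int) - 5 with haux
    by_cases hc : tables.contains aux
    · have hget : tables.getD aux PySem.Dict.empty = sessionTable codemirror aux := by
        rw [PySem.Dict.getD_eq_get?_getD]
        have := PySem.Dict.contains_eq_isSome_get? tables aux
        rw [hc] at this
        cases hg : tables.get? aux with
        | none => rw [hg] at this; simp at this
        | some t => simp [hinv aux t hg]
      simp only [hc, if_true]
      rw [ih _ _ hinv, hget, sessionTable_getD']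
    · have hget : (tables.insert aux (sessionTable codemirror aux)).getD aux PySem.Dict.empty
          = sessionTable codemirror aux := PySem.Dict.getD_insert_self _ _ _ _
      simp only [hc, if_false, Bool.false_eq_true]
      have hinv' : ∀ a t, (tables.insert aux (sessionTable codemirror aux)).get? a = some t →
          t = sessionTable codemirror a := by
        intro a t hg
        by_cases ha : a = aux
        · subst ha; rw [PySem.Dict.get?_insert_self] at hg; injection hg with h; exact h.symm
        · rw [PySem.Dict.get?_insert] at hg; simp [ha] at hg; exact hinv a t hg
      rw [ih _ _ hinv', hget, sessionTable_getD']

-- A's outer loop over lista equals the concatenation-of-filters fold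
theorem session_outer (codemirror : List String) :
    ∀ (ls : List String) (r : List String),
      ls.foldl (fun aux1 l =>
        codemirror.foldl (fun acc c =>
          if PySem.Str.slice l none (some ((PySem.Str.len l : Int) - 5)) = PySem.Str.slice c none (some ((PySem.Str.len l : Int) - 5))
          then acc ++ [c] else acc) aux1) r
      = ls.foldl (fun res l =>
          res ++ codemirror.filter (fun c =>
            PySem.Str.slice c none (some ((PySem.Str.len l : Int) - 5)) == PySem.Str.slice l none (some ((PySem.Str.len l : Int) - 5)))) r := by
  intro ls
  induction ls with
  | nil => intro r; rfl
  | cons x xs ihx =>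
    intro r
    simp only [List.foldl_cons]
    rw [session_inner, ihx]

-- ===== VERDICT (by name: the statement is the Claim_ definition above) =====
theorem session_spec : Claim_equal_session := by
  intro codemirror lista turma _
  unfold Spec_session session session_alt
  rw [session_alt_loop codemirror lista [] PySem.Dict.empty (by intro a t h; simp [PySem.Dict.get?_empty] at h)]
  exact session_outer codemirror lista []
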